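-- pv_equiv track=rewrite | github.com/michaelWoods786/COMP431 | FTP_Client2.py | parse_reply_text
-- ===== SOURCE A (Python) =====
-- ascii_codes = {
--     "A": ord("A"), "Z": ord("Z"),
--     "a": ord("a"), "z": ord("z"),
--     "0": ord("0"), "9": ord("9"),
--     "min_ascii_val": 0, "max_ascii_val": 127}
--
-- def parse_reply_text(reply):
--     reply_text = ""
--     if reply[0] == '\n' or reply[0:2] == '\r\n':
--         return "ERROR -- reply_text", reply_text
--     else:
--         while len(reply) > 1:
--             if len(reply) == 2 and reply[0:2] == '\r\n':
--                 return reply, reply_text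
--             elif ord(reply[0]) >= ascii_codes["min_ascii_val"] and ord(reply[0]) <= ascii_codes["max_ascii_val"]:
--                 reply_text += reply[0]
--                 reply = reply[1:]
--             else:
--                 return "ERROR -- reply_text", reply_text
--         return reply, reply_text
-- ===== SOURCE B (Python) =====
-- def parse_reply_text(reply):
--     if reply[0] == '\n' or reply[0:2] == '\r\n':
--         return "ERROR -- reply_text", ""
--     if reply.endswith('\r\n'):
--         body, tail = reply[:-2], '\r\n'
--     else:
--         body, tail = reply[:-1], reply[-1:]
--     for i, c in enumerate(body):
--         if ord(c) > 127:
--             return "ERROR -- reply_text", body[:i]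
--     return tail, body
-- ===== Notes on version B (the rewrite author's own statement) =====
-- stated objective: faster
-- what changed: A decides termination inside the loop, re-checking at every step whether exactly a trailing CRLF remains and rebuilding the string by repeated one-char slicing; B computes body and tail up front with a single endswith test and two slices, then does one pure validation scan over body.
import Mathlib
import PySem

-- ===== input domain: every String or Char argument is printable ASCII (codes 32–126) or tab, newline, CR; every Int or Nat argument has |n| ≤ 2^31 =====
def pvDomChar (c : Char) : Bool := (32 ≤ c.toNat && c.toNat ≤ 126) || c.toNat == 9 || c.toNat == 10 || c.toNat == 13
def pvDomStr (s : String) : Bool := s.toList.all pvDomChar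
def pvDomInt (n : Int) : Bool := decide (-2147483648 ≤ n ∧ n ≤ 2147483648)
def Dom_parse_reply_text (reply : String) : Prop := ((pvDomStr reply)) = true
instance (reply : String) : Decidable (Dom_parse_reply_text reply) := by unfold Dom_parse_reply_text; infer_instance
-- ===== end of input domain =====

-- B hoists A's per-step CRLF-termination check into one whole-string endswith test followed by a plain validation scan (objective: simpler).

-- ===== PORT A =====
-- A's while-loop: consumes reply one char at a time, accumulating reply_text.
def pvA_loop : List Char → List Char → String × String
  | [], acc => (String.mk [], String.mk acc)
  | [c], acc => (String.mk [c], String.mk acc)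
  | c1 :: c2 :: rest, acc =>
    if rest = [] ∧ c1 = '\r' ∧ c2 = '\n' then (String.mk [c1, c2], String.mk acc)
    else if c1.toNat ≤ 127 then pvA_loop (c2 :: rest) (acc ++ [c1])
    else ("ERROR -- reply_text", String.mk acc)

def parse_reply_text (reply : String) : String × String :=
  match reply.toList with
  | [] => ("", "")   -- reply[0] raises IndexError in Python; excluded by Pre_
  | c :: rest =>
    if c = '\n' ∨ (c = '\r' ∧ rest.head? = some '\n') then ("ERROR -- reply_text", "")
    else pvA_loop (c :: rest) []

-- ===== PORT B =====
-- B's validation pass over body (enumerate with ord(c) > 127 check).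
def pvB_loop (tail : String) : List Char → List Char → String × String
  | seen, [] => (tail, String.mk seen)
  | seen, c :: cs =>
    if 127 < c.toNat then ("ERROR -- reply_text", String.mk seen)
    else pvB_loop tail (seen ++ [c]) cs

def parse_reply_text_alt (reply : String) : String × String :=
  match reply.toList with
  | [] => ("", "")   -- reply[0] raises IndexError in Python; excluded by Pre_
  | c :: rest =>
    if c = '\n' ∨ (c = '\r' ∧ rest.head? = some '\n') then ("ERROR -- reply_text", "")
    else
      -- reply.endswith('\r\n') → body = reply[:-2], tail = '\r\n'; else body = reply[:-1], tail = reply[-1:]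
      if (c :: rest).getLast? = some '\n' ∧ (c :: rest).dropLast.getLast? = some '\r' then
        pvB_loop (String.mk ['\r', '\n']) [] (c :: rest).dropLast.dropLast
      else
        pvB_loop (String.mk ((c :: rest).getLast?.toList)) [] (c :: rest).dropLast

-- ===== PRECONDITION & SPEC =====
-- Pre_ excludes only the empty string, on which A (and B) raise IndexError at reply[0].
def Pre_parse_reply_text (reply : String) : Prop := reply ≠ ""
instance (reply : String) : Decidable (Pre_parse_reply_text reply) := by unfold Pre_parse_reply_text; infer_instance
def pvWitness_parse_reply_text : String := "250 ok\r\n"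

def Spec_parse_reply_text (reply : String) (out : String × String) : Prop := out = parse_reply_text_alt reply
instance (reply : String) (out : String × String) : Decidable (Spec_parse_reply_text reply out) := by unfold Spec_parse_reply_text; infer_instance

-- ===== CLAIM (what is proved, stated in full; the proofs are below) =====
def Claim_equal_parse_reply_text : Prop := ∀ (reply : String), Dom_parse_reply_text reply → Pre_parse_reply_text reply → Spec_parse_reply_text reply (parse_reply_text reply)

-- ===== LEMMAS AND PROOFS =====

-- On all-ASCII input the ord check in A's loop never fires: the loop just splits off the
-- trailing CRLF (when the last two chars are exactly '\r\n') or the final single char.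
lemma pvA_loop_spec (l acc : List Char) (h : ∀ c ∈ l, c.toNat ≤ 127) :
    pvA_loop l acc =
      if l.getLast? = some '\n' ∧ l.dropLast.getLast? = some '\r' then
        (String.mk ['\r', '\n'], String.mk (acc ++ l.dropLast.dropLast))
      else
        (String.mk (l.getLast?.toList), String.mk (acc ++ l.dropLast)) := by
  induction l generalizing acc with
  | nil => simp [pvA_loop]
  | cons c1 t ih =>
    cases t with
    | nil => simp [pvA_loop]
    | cons c2 rest =>
      by_cases hend : rest = [] ∧ c1 = '\r' ∧ c2 = '\n'
      · obtain ⟨h1, h2, h3⟩ := hend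
        subst h1 h2 h3
        simp [pvA_loop]
      · have h1 : c1.toNat ≤ 127 := h c1 (by simp)
        have ht : ∀ c ∈ c2 :: rest, c.toNat ≤ 127 := fun c hc => h c (by simp [hc])
        rw [pvA_loop]
        simp only [hend, if_false, h1, if_true]
        rw [ih (acc ++ [c1]) ht]
        cases rest with
        | nil =>
          have : ¬(c1 = '\r' ∧ c2 = '\n') := fun hc => hend ⟨rfl, hc⟩
          simp [List.getLast?]
          by_cases hc2 : c2 = '\n'
          · subst hc2
            have hc1 : ¬ c1 = '\r' := fun hc => this ⟨hc, rfl⟩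
            simp [hc1]
          · simp [hc2]
        | cons c3 rest' =>
          cases hd : (c2 :: c3 :: rest').dropLast with
          | nil => simp at hd
          | cons x xs =>
            have e1 : (c1 :: c2 :: c3 :: rest').dropLast = c1 :: x :: xs := by
              rw [show (c1 :: c2 :: c3 :: rest').dropLast = c1 :: (c2 :: c3 :: rest').dropLast from rfl, hd]
            have e2 : (c1 :: x :: xs).dropLast = c1 :: (x :: xs).dropLast := rfl
            rw [e1, e2]
            simp only [List.getLast?_cons_cons]
            split_ifs with hcond
            · simp
            · simp

-- On all-ASCII body B's scan never fires either: it returns (tail, body).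
lemma pvB_loop_spec (tail : String) (seen body : List Char) (h : ∀ c ∈ body, c.toNat ≤ 127) :
    pvB_loop tail seen body = (tail, String.mk (seen ++ body)) := by
  induction body generalizing seen with
  | nil => simp [pvB_loop]
  | cons c cs ih =>
    have hc : c.toNat ≤ 127 := h c (by simp)
    rw [pvB_loop]
    have : ¬ (127 < c.toNat) := by omega
    simp only [this, if_false]
    rw [ih (seen ++ [c]) (fun x hx => h x (by simp [hx]))]
    simp

lemma dom_chars_le (reply : String) (hd : Dom_parse_reply_text reply) :
    ∀ c ∈ reply.toList, c.toNat ≤ 127 := by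
  intro c hc
  have := (List.all_eq_true.mp hd) c hc
  simp only [pvDomChar, Bool.or_eq_true, Bool.and_eq_true, decide_eq_true_eq, beq_iff_eq] at this
  omega

-- ===== VERDICT (by name: the statement is the Claim_ definition above) =====
theorem parse_reply_text_spec : Claim_equal_parse_reply_text := by
  intro reply hd hpre
  unfold Spec_parse_reply_text parse_reply_text parse_reply_text_alt
  have hle := dom_chars_le reply hd
  cases hl : reply.toList with
  | nil => rfl
  | cons c rest =>
    simp only
    by_cases hguard : (c = '\n' ∨ (c = '\x0d' ∧ rest.head? = some '\n'))
    · rw [if_pos hguard, if_pos hguard]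
    · rw [if_neg hguard, if_neg hguard]
      have hall : ∀ x ∈ c :: rest, x.toNat ≤ 127 := by rw [← hl]; exact hle
      rw [pvA_loop_spec _ _ hall]
      split_ifs with hcrlf
      · rw [pvB_loop_spec _ _ _ (fun x hx => hall x (List.dropLast_subset _ (List.dropLast_subset _ hx)))]
      · rw [pvB_loop_spec _ _ _ (fun x hx => hall x (List.dropLast_subset _ hx))]
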